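-- pv_equiv track=rewrite | github.com/AndyYu25/Chess-Python | Python_13_ChessGame.py | getStraightLine
-- ===== SOURCE A (Python) =====
-- def getStraightLine(board:list,row:int,col:int,direction:str)->list:
--     """
--     return a list of positions for a horizontal/vertical line in the
--     specified direction. Checks if a position is inside the board before
--     adding it to the output list.
--     """
--     positionList = []
--     if direction == 'up':
--         #use insert instead of append so that the positions closest to the
--         #piece will be evaluated first in validLinePositions()
--         for upDistance in range(row, 0, -1):
--             positionList.insert(0,(row - upDistance, col))
--     elif direction == 'down':
--         for downDistance in range(1, len(board) - row):
--             positionList.append((row + downDistance, col))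
--     elif direction == 'left':
--         for leftDistance in range(col, 0, -1):
--             positionList.insert(0,(row, col - leftDistance))
--     elif direction == 'right':
--         for rightDistance in range(1, len(board[0]) - col):
--             positionList.append((row, col + rightDistance))
--     return positionList
-- ===== SOURCE B (Python) =====
-- def getStraightLine(board: list, row: int, col: int, direction: str) -> list:
--     """Table-driven: one uniform loop over a (drow, dcol) delta looked up per
--     direction, with a per-direction step count; closest positions first."""
--     deltas = {'up': (-1, 0), 'down': (1, 0), 'left': (0, -1), 'right': (0, 1)}
--     if direction not in deltas:
--         return []
--     drow, dcol = deltas[direction]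
--     if drow < 0:
--         count = row
--     elif drow > 0:
--         count = len(board) - 1 - row
--     elif dcol < 0:
--         count = col
--     else:
--         count = len(board[0]) - 1 - col
--     return [(row + drow * k, col + dcol * k) for k in range(1, count + 1)]
-- ===== Notes on version B (the rewrite author's own statement) =====
-- stated objective: simpler
-- what changed: Replaces the four separate branch loops (two building backwards with insert(0,...), two appending) by one direction->delta lookup table and a single uniform forward comprehension over a per-direction step count.
import Mathlib
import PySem

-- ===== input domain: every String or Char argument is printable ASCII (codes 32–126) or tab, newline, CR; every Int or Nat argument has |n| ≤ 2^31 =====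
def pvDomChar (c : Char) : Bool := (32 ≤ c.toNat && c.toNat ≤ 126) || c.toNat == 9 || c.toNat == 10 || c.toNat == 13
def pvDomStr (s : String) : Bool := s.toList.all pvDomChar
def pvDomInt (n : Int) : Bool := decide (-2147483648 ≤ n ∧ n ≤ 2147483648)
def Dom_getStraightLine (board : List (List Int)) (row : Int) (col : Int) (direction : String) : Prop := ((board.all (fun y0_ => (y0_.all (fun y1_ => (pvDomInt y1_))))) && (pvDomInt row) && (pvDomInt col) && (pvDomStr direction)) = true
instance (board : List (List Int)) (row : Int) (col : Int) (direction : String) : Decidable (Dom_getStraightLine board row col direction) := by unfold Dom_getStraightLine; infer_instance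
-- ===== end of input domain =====

-- B replaces A's four branch loops (two built backwards with insert(0,..)) by one
-- delta-table lookup and a single uniform forward loop (objective: simpler).

-- ===== PORT A =====
def getStraightLine (board : List (List Int)) (row : Int) (col : Int) (direction : String) : List (Int × Int) :=
  if direction = "up" then
    (PySem.List.pyRange row 0 (-1)).foldl
      (fun acc d => PySem.List.insert acc 0 (row - d, col)) []
  else if direction = "down" then
    (PySem.List.pyRange 1 (PySem.List.len board - row) 1).foldl
      (fun acc d => acc ++ [(row + d, col)]) []
  else if direction = "left" then
    (PySem.List.pyRange col 0 (-1)).foldl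
      (fun acc d => PySem.List.insert acc 0 (row, col - d)) []
  else if direction = "right" then
    -- board[0]: the IndexError on an empty board is excluded by Pre_
    (PySem.List.pyRange 1 (PySem.List.len (PySem.List.pyGetD board 0 []) - col) 1).foldl
      (fun acc d => acc ++ [(row, col + d)]) []
  else []

-- ===== PORT B =====
def pvDeltas : PySem.Dict String (Int × Int) :=
  PySem.Dict.ofList [("up", (-1, 0)), ("down", (1, 0)), ("left", (0, -1)), ("right", (0, 1))]

def getStraightLine_alt (board : List (List Int)) (row : Int) (col : Int) (direction : String) : List (Int × Int) :=
  match pvDeltas.get? direction with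
  | none => []
  | some (drow, dcol) =>
    let count : Int :=
      if drow < 0 then row
      else if drow > 0 then PySem.List.len board - 1 - row
      else if dcol < 0 then col
      else PySem.List.len (PySem.List.pyGetD board 0 []) - 1 - col
    (PySem.List.pyRange 1 (count + 1) 1).map (fun k => (row + drow * k, col + dcol * k))

-- ===== PRECONDITION & SPEC =====
-- Pre_ excludes only direction = "right" with an empty board, where both A and B raise IndexError on board[0].
def Pre_getStraightLine (board : List (List Int)) (row : Int) (col : Int) (direction : String) : Prop :=
  direction = "right" → board ≠ []
instance (board : List (List Int)) (row : Int) (col : Int) (direction : String) : Decidable (Pre_getStraightLine board row col direction) := by unfold Pre_getStraightLine; infer_instance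

def pvWitness_getStraightLine : List (List Int) × Int × Int × String := ([[1, 2], [3, 4]], 0, 1, "right")

def Spec_getStraightLine (board : List (List Int)) (row : Int) (col : Int) (direction : String) (out : List (Int × Int)) : Prop := out = getStraightLine_alt board row col direction
instance (board : List (List Int)) (row : Int) (col : Int) (direction : String) (out : List (Int × Int)) : Decidable (Spec_getStraightLine board row col direction out) := by unfold Spec_getStraightLine; infer_instance

-- ===== CLAIM (what is proved, stated in full; the proofs are below) =====
def Claim_equal_getStraightLine : Prop := ∀ (board : List (List Int)) (row : Int) (col : Int) (direction : String), Dom_getStraightLine board row col direction → Pre_getStraightLine board row col direction → Spec_getStraightLine board row col direction (getStraightLine board row col direction)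

-- ===== LEMMAS AND PROOFS =====

-- a foldr that conses f x builds map f ++ init
theorem pv_foldr_cons {α : Type} (f : Int → α) (l : List Int) (init : List α) :
    l.foldr (fun x acc => f x :: acc) init = l.map f ++ init := by
  induction l generalizing init <;> simp [*]

-- B evaluated at each literal direction (the dict lookup reduces definitionally)
theorem pv_alt_up (board : List (List Int)) (row col : Int) :
    getStraightLine_alt board row col "up"
      = (PySem.List.pyRange 1 (row + 1) 1).map (fun k => (row + (-1) * k, col + 0 * k)) := rfl

theorem pv_alt_down (board : List (List Int)) (row col : Int) :
    getStraightLine_alt board row col "down"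
      = (PySem.List.pyRange 1 (PySem.List.len board - 1 - row + 1) 1).map
          (fun k => (row + 1 * k, col + 0 * k)) := rfl

theorem pv_alt_left (board : List (List Int)) (row col : Int) :
    getStraightLine_alt board row col "left"
      = (PySem.List.pyRange 1 (col + 1) 1).map (fun k => (row + 0 * k, col + (-1) * k)) := rfl

theorem pv_alt_right (board : List (List Int)) (row col : Int) :
    getStraightLine_alt board row col "right"
      = (PySem.List.pyRange 1 (PySem.List.len (PySem.List.pyGetD board 0 []) - 1 - col + 1) 1).map
          (fun k => (row + 0 * k, col + 1 * k)) := rfl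

theorem pv_alt_other (board : List (List Int)) (row col : Int) (direction : String)
    (hu : direction ≠ "up") (hd : direction ≠ "down") (hl : direction ≠ "left")
    (hr : direction ≠ "right") : getStraightLine_alt board row col direction = [] := by
  have hitems : pvDeltas.items
      = [("up", ((-1 : Int), (0 : Int))), ("down", (1, 0)), ("left", (0, -1)), ("right", (0, 1))] := by
    decide
  unfold getStraightLine_alt PySem.Dict.get?
  rw [hitems]
  have b1 : ("up" == direction) = false := beq_eq_false_iff_ne.mpr (Ne.symm hu)
  have b2 : ("down" == direction) = false := beq_eq_false_iff_ne.mpr (Ne.symm hd)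
  have b3 : ("left" == direction) = false := beq_eq_false_iff_ne.mpr (Ne.symm hl)
  have b4 : ("right" == direction) = false := beq_eq_false_iff_ne.mpr (Ne.symm hr)
  simp [List.find?, b1, b2, b3, b4]

-- A's backwards-building branch equals the forward map
theorem pv_up_branch (f : Int → Int × Int) (a : Int) :
    (PySem.List.pyRange a 0 (-1)).foldl (fun acc d => f d :: acc) []
      = (PySem.List.pyRange 1 (a + 1) 1).map f := by
  rw [PySem.List.pyRange_neg_one_eq_reverse, List.foldl_reverse]
  norm_num [pv_foldr_cons]

-- ===== VERDICT =====
theorem getStraightLine_spec : Claim_equal_getStraightLine := by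
  intro board row col direction _hdom _hpre
  unfold Spec_getStraightLine getStraightLine
  by_cases hu : direction = "up"
  · subst hu
    rw [if_pos rfl, pv_alt_up]
    simp only [PySem.List.insert_zero]
    rw [pv_up_branch (fun d => (row - d, col)) row]
    simp [List.map_inj_left]
    intro k _ _
    omega
  · rw [if_neg hu]
    by_cases hd : direction = "down"
    · subst hd
      rw [if_pos rfl, pv_alt_down]
      rw [PySem.List.foldl_append_singleton_eq_map]
      have he : PySem.List.len board - 1 - row + 1 = PySem.List.len board - row := by ring
      rw [he]
      simp
    · rw [if_neg hd]
      by_cases hl : direction = "left"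
      · subst hl
        rw [if_pos rfl, pv_alt_left]
        simp only [PySem.List.insert_zero]
        rw [pv_up_branch (fun d => (row, col - d)) col]
        simp [List.map_inj_left]
        intro k _ _
        omega
      · rw [if_neg hl]
        by_cases hr : direction = "right"
        · subst hr
          rw [if_pos rfl, pv_alt_right]
          rw [PySem.List.foldl_append_singleton_eq_map]
          have he : PySem.List.len (PySem.List.pyGetD board 0 []) - 1 - col + 1
              = PySem.List.len (PySem.List.pyGetD board 0 []) - col := by ring
          rw [he]
          simp
        · rw [if_neg hr, pv_alt_other board row col direction hu hd hl hr]
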